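-- pv_equiv track=rewrite | github.com/Fall-2025-COMP163/project-3-ijmallory | quest_handler.py | get_total_quest_rewards_earned
-- ===== SOURCE A (Python) =====
-- def get_completed_quests(character, quest_data_dict):
--     """
--     Get full data for all completed quests
--
--     Returns: List of quest dictionaries for completed quests
--     """
--     # TODO: Implement completed quest retrieval
--     completed_quests_data = []
--
--     for q_id in character['completed_quests']:
--         if q_id in quest_data_dict:
--             completed_quests_data.append(quest_data_dict[q_id])
--
--     return completed_quests_data
--     pass
--
-- def get_total_quest_rewards_earned(character, quest_data_dict):
--     """
--     Calculate total XP and gold earned from completed quests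
--
--     Returns: Dictionary with 'total_xp' and 'total_gold'
--     """
--     # TODO: Implement reward calculation
--     total_xp = 0
--     total_gold = 0
--
--     completed_data = get_completed_quests(character, quest_data_dict)
--
--     # Sum up reward_xp and reward_gold for all completed quests
--     for quest in completed_data:
--         total_xp += quest.get('REWARD_XP', 0)
--         total_gold += quest.get('REWARD_GOLD', 0)
--
--     return {
--         'total_xp': total_xp,
--         'total_gold': total_gold
--     }
--     pass
-- ===== SOURCE B (Python) =====
-- def get_total_quest_rewards_earned(character, quest_data_dict):
--     # Different algorithm: build a multiplicity counter of completed quest ids,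
--     # then one weighted pass over quest_data_dict.items() adding count * reward.
--     counts = {}
--     for q_id in character['completed_quests']:
--         counts[q_id] = counts.get(q_id, 0) + 1
--     total_xp = 0
--     total_gold = 0
--     for q_id, quest in quest_data_dict.items():
--         c = counts.get(q_id, 0)
--         if c != 0:
--             total_xp += c * quest.get('REWARD_XP', 0)
--             total_gold += c * quest.get('REWARD_GOLD', 0)
--     return {'total_xp': total_xp, 'total_gold': total_gold}
-- ===== Notes on version B (the rewrite author's own statement) =====
-- stated objective: alternative
-- what changed: B builds a Counter-style multiplicity map of the completed quest ids and then makes one weighted pass over quest_data_dict.items(), adding count*reward per quest, instead of scanning the completed list and looking each id up in the dict; sums agree because integer addition is commutative and duplicates are weighted by their count.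
import Mathlib
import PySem

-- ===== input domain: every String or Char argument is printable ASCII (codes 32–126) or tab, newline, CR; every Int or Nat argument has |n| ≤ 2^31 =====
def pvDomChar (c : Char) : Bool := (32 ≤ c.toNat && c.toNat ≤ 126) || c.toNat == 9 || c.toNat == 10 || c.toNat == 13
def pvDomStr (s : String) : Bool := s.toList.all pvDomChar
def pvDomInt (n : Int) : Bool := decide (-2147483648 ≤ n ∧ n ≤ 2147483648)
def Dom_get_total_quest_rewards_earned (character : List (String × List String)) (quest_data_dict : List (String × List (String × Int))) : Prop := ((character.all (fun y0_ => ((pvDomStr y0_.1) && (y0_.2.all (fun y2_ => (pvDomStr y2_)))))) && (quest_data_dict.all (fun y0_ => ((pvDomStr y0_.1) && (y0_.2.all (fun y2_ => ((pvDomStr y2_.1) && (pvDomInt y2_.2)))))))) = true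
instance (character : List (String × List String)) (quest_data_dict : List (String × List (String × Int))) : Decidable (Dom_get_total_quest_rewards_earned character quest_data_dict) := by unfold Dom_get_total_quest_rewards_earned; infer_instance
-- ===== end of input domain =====

-- B replaces A's collect-then-sum scan of the completed list by a multiplicity counter
-- plus one weighted pass over the quest dict (alternative algorithm, same results).

-- ===== PORT A =====
-- helper get_completed_quests: build the list of quest dicts for completed quest ids
def pv_get_completed_quests (character : List (String × List String)) (quest_data_dict : List (String × List (String × Int))) : List (List (String × Int)) :=
  let qdd := PySem.Dict.ofList quest_data_dict
  (((PySem.Dict.ofList character).getD "completed_quests" []).foldl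
    (fun acc q_id => if qdd.contains q_id then acc ++ [qdd.getD q_id []] else acc) [])

def get_total_quest_rewards_earned (character : List (String × List String)) (quest_data_dict : List (String × List (String × Int))) : List (String × Int) :=
  let completed_data := pv_get_completed_quests character quest_data_dict
  let totals := completed_data.foldl
    (fun (t : Int × Int) quest =>
      (t.1 + (PySem.Dict.ofList quest).getD "REWARD_XP" 0,
       t.2 + (PySem.Dict.ofList quest).getD "REWARD_GOLD" 0)) (0, 0)
  [("total_xp", totals.1), ("total_gold", totals.2)]

-- ===== PORT B =====
def get_total_quest_rewards_earned_alt (character : List (String × List String)) (quest_data_dict : List (String × List (String × Int))) : List (String × Int) :=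
  let counts := ((PySem.Dict.ofList character).getD "completed_quests" []).foldl
    (fun (d : PySem.Dict String Int) q_id => d.insert q_id (d.getD q_id 0 + 1)) PySem.Dict.empty
  let totals := (PySem.Dict.ofList quest_data_dict).items.foldl
    (fun (t : Int × Int) kv =>
      let c := counts.getD kv.1 0
      if c ≠ 0 then
        let quest := PySem.Dict.ofList kv.2
        (t.1 + c * quest.getD "REWARD_XP" 0, t.2 + c * quest.getD "REWARD_GOLD" 0)
      else t) (0, 0)
  [("total_xp", totals.1), ("total_gold", totals.2)]

-- ===== PRECONDITION & SPEC =====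
-- A raises KeyError when character has no 'completed_quests' key; Pre_ excludes exactly that.
def Pre_get_total_quest_rewards_earned (character : List (String × List String)) (quest_data_dict : List (String × List (String × Int))) : Prop :=
  (PySem.Dict.ofList character).contains "completed_quests" = true
instance (character : List (String × List String)) (quest_data_dict : List (String × List (String × Int))) : Decidable (Pre_get_total_quest_rewards_earned character quest_data_dict) := by unfold Pre_get_total_quest_rewards_earned; infer_instance
def pvWitness_get_total_quest_rewards_earned : (List (String × List String)) × (List (String × List (String × Int))) :=
  ([("completed_quests", ["q1", "q3", "q1"])], [("q1", [("REWARD_XP", 10), ("REWARD_GOLD", 5)]), ("q2", [("REWARD_XP", 7)])])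

def Spec_get_total_quest_rewards_earned (character : List (String × List String)) (quest_data_dict : List (String × List (String × Int))) (out : List (String × Int)) : Prop := out = get_total_quest_rewards_earned_alt character quest_data_dict
instance (character : List (String × List String)) (quest_data_dict : List (String × List (String × Int))) (out : List (String × Int)) : Decidable (Spec_get_total_quest_rewards_earned character quest_data_dict out) := by unfold Spec_get_total_quest_rewards_earned; infer_instance

-- ===== CLAIM (what is proved, stated in full; the proofs are below) =====
def Claim_equal_get_total_quest_rewards_earned : Prop := ∀ (character : List (String × List String)) (quest_data_dict : List (String × List (String × Int))), Dom_get_total_quest_rewards_earned character quest_data_dict → Pre_get_total_quest_rewards_earned character quest_data_dict → Spec_get_total_quest_rewards_earned character quest_data_dict (get_total_quest_rewards_earned character quest_data_dict)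

-- ===== LEMMAS AND PROOFS =====

-- a 0/1-weighted sum over a duplicate-free key list picks out the single matching key
theorem pv_sum_delta (keys : List String) (hnd : keys.Nodup) (i : String) (h : String → Int) :
    (keys.map (fun k => (if i == k then (1 : Int) else 0) * h k)).sum
      = if i ∈ keys then h i else 0 := by
  induction keys with
  | nil => simp
  | cons k ks ih =>
    rcases List.nodup_cons.mp hnd with ⟨hk, hks⟩
    by_cases hki : k = i
    · subst hki
      simp only [List.map_cons, List.sum_cons, beq_self_eq_true, if_true, one_mul,
        List.mem_cons, true_or, if_true]
      rw [List.sum_eq_zero, add_zero]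
      intro x hx
      simp only [List.mem_map] at hx
      obtain ⟨k', hk', rfl⟩ := hx
      have hne : (k == k') = false := by
        simp only [beq_eq_false_iff_ne]
        intro hEq; exact hk (hEq ▸ hk')
      simp [hne]
    · have hbeq : (i == k) = false := by
        simp only [beq_eq_false_iff_ne]
        exact fun h' => hki h'.symm
      have hmem : (i ∈ k :: ks) ↔ i ∈ ks := by
        rw [List.mem_cons]
        exact or_iff_right (fun h' => hki h'.symm)
      simp only [List.map_cons, List.sum_cons, hbeq, Bool.false_eq_true, if_false, zero_mul,
        zero_add, ih hks, hmem]

-- summing rewards along the completed list equals the count-weighted sum over the keys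
theorem pv_core (keys : List String) (hnd : keys.Nodup) (h : String → Int) (ids : List String) :
    ((ids.filter (fun q => decide (q ∈ keys))).map h).sum
      = (keys.map (fun k => ((List.count k ids : Int)) * h k)).sum := by
  induction ids with
  | nil => simp
  | cons i rest ih =>
    have hsplit : (keys.map (fun k => ((List.count k (i :: rest) : Int)) * h k)).sum
        = (keys.map (fun k => ((List.count k rest : Int)) * h k)).sum
          + (keys.map (fun k => (if i == k then (1 : Int) else 0) * h k)).sum := by
      have hfun : (fun k => ((List.count k (i :: rest) : Int)) * h k)
          = fun k => ((List.count k rest : Int)) * h k + (if i == k then (1 : Int) else 0) * h k := by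
        funext k
        rw [List.count_cons]
        push_cast
        ring
      rw [hfun, PySem.List.sum_map_add_int]
    rw [hsplit, pv_sum_delta keys hnd i h, ← ih]
    by_cases hi : i ∈ keys
    · rw [List.filter_cons_of_pos (by simpa), List.map_cons, List.sum_cons, if_pos hi]
      ring
    · rw [List.filter_cons_of_neg (by simpa), if_neg hi, add_zero]

-- the heart of the equivalence, stated over an arbitrary quest dict with unique keys
theorem pv_main (d : PySem.Dict String (List (String × Int))) (hnd : d.keys.Nodup)
    (ids : List String) :
    (ids.foldl (fun acc q_id => if d.contains q_id then acc ++ [d.getD q_id []] else acc) []).foldl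
      (fun (t : Int × Int) quest =>
        (t.1 + (PySem.Dict.ofList quest).getD "REWARD_XP" 0,
         t.2 + (PySem.Dict.ofList quest).getD "REWARD_GOLD" 0)) (0, 0)
    = d.items.foldl
        (fun (t : Int × Int) kv =>
          let c := (PySem.Dict.counter ids).getD kv.1 0
          if c ≠ 0 then
            (t.1 + c * (PySem.Dict.ofList kv.2).getD "REWARD_XP" 0,
             t.2 + c * (PySem.Dict.ofList kv.2).getD "REWARD_GOLD" 0)
          else t) (0, 0) := by
  have hbody : (fun (t : Int × Int) (kv : String × List (String × Int)) =>
        let c := (PySem.Dict.counter ids).getD kv.1 0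
        if c ≠ 0 then
          (t.1 + c * (PySem.Dict.ofList kv.2).getD "REWARD_XP" 0,
           t.2 + c * (PySem.Dict.ofList kv.2).getD "REWARD_GOLD" 0)
        else t)
      = (fun (t : Int × Int) (kv : String × List (String × Int)) =>
          (t.1 + (PySem.Dict.counter ids).getD kv.1 0 * (PySem.Dict.ofList kv.2).getD "REWARD_XP" 0,
           t.2 + (PySem.Dict.counter ids).getD kv.1 0 * (PySem.Dict.ofList kv.2).getD "REWARD_GOLD" 0)) := by
    funext t kv
    dsimp only
    by_cases hc : (PySem.Dict.counter ids).getD kv.1 0 = 0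
    · simp only [hc, ne_eq, not_true_eq_false, if_false, zero_mul, add_zero]
    · simp only [ne_eq, hc, not_false_eq_true, if_true]
  rw [hbody, PySem.List.foldl_append_if, List.nil_append,
    PySem.List.foldl_prod_mk (fun a quest => a + (PySem.Dict.ofList quest).getD "REWARD_XP" 0)
      (fun a quest => a + (PySem.Dict.ofList quest).getD "REWARD_GOLD" 0),
    PySem.List.foldl_prod_mk
      (fun a (kv : String × List (String × Int)) =>
        a + (PySem.Dict.counter ids).getD kv.1 0 * (PySem.Dict.ofList kv.2).getD "REWARD_XP" 0)
      (fun a (kv : String × List (String × Int)) =>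
        a + (PySem.Dict.counter ids).getD kv.1 0 * (PySem.Dict.ofList kv.2).getD "REWARD_GOLD" 0),
    PySem.List.foldl_add _ (fun quest => (PySem.Dict.ofList quest).getD "REWARD_XP" 0) 0,
    PySem.List.foldl_add _ (fun quest => (PySem.Dict.ofList quest).getD "REWARD_GOLD" 0) 0,
    PySem.List.foldl_add _
      (fun (kv : String × List (String × Int)) =>
        (PySem.Dict.counter ids).getD kv.1 0 * (PySem.Dict.ofList kv.2).getD "REWARD_XP" 0) 0,
    PySem.List.foldl_add _
      (fun (kv : String × List (String × Int)) =>
        (PySem.Dict.counter ids).getD kv.1 0 * (PySem.Dict.ofList kv.2).getD "REWARD_GOLD" 0) 0,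
    PySem.Dict.items_eq_map_keys d hnd []]
  have hcontains : d.contains = (fun q => decide (q ∈ d.keys)) :=
    funext (PySem.Dict.contains_eq_decide_mem_keys d)
  simp only [List.map_map, Function.comp_def, PySem.Dict.getD_counter, hcontains, zero_add]
  rw [pv_core d.keys hnd (fun q => (PySem.Dict.ofList (d.getD q [])).getD "REWARD_XP" 0) ids,
    pv_core d.keys hnd (fun q => (PySem.Dict.ofList (d.getD q [])).getD "REWARD_GOLD" 0) ids]

-- ===== VERDICT (by name: the statement is the Claim_ definition above) =====
theorem get_total_quest_rewards_earned_spec : Claim_equal_get_total_quest_rewards_earned := by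
  intro character quest_data_dict _ _
  unfold Spec_get_total_quest_rewards_earned get_total_quest_rewards_earned
    get_total_quest_rewards_earned_alt pv_get_completed_quests
  simp only [PySem.Dict.foldl_insert_getD_add_one_eq_counter]
  rw [pv_main (PySem.Dict.ofList quest_data_dict) (PySem.Dict.nodup_keys_ofList quest_data_dict)]
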